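-- pv_equiv track=rewrite | github.com/ucesnsa/mobile_data | mylib/od_cluster_map.py | get_colour_list
-- ===== SOURCE A (Python) =====
-- def get_colour_list(lst):
--     c_red = 210
--     c_green = 20
--     c_blue = 20
--     increment = 20
--     col_lst = list()
--     for i, item in enumerate(lst):
--         c_red = c_red - int(increment / 10)
--         # c_blue = c_blue + increment
--         c_green = c_green + increment
--         base_value = "%x%x%x" % (c_red, c_green, c_blue)
--         col_lst.append((item, '#' + base_value))
--     return col_lst
-- ===== SOURCE B (Python) =====
-- def get_colour_list(lst):
--     # divide and conquer: split the list in half, colour each half recursively,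
--     # deriving channels from the absolute 1-based position (no running state)
--     def colour(k):
--         return '#%x%x%x' % (210 - 2 * k, 20 + 20 * k, 20)
--
--     def go(sub, off):
--         if not sub:
--             return []
--         if len(sub) == 1:
--             return [(sub[0], colour(off + 1))]
--         mid = len(sub) // 2
--         return go(sub[:mid], off) + go(sub[mid:], off + mid)
--
--     return go(lst, 0)
-- ===== Notes on version B (the rewrite author's own statement) =====
-- stated objective: alternative
-- what changed: Replaces A's single forward pass threading mutable c_red/c_green accumulators with a divide-and-conquer recursion that splits the list in halves and derives each colour channel in closed form from the element's absolute position.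
import Mathlib
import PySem

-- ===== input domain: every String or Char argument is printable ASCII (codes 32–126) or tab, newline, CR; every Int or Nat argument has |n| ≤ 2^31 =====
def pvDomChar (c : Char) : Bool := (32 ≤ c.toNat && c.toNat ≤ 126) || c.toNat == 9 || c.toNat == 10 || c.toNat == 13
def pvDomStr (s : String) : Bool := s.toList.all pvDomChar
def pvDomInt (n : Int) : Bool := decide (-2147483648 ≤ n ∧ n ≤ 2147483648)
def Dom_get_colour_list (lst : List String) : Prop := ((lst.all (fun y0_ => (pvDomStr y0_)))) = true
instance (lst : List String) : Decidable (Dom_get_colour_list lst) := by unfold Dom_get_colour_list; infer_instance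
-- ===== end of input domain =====

-- B replaces A's forward loop with mutable c_red/c_green accumulators by a
-- divide-and-conquer recursion over list halves, each colour computed in closed
-- form from the element's absolute position (objective: alternative).

-- shared primitive: Python's '%x' % n for int n — lowercase hex digits, '-' prefix
-- for negatives, no padding; exact on all Int (hand-written, PySem has no hex formatter)
def pyHex (n : Int) : String :=
  if n < 0 then "-" ++ String.ofList (Nat.toDigits 16 n.natAbs)
  else String.ofList (Nat.toDigits 16 n.toNat)

-- ===== PORT A =====
-- loop body of A: state (c_red, c_green, col_lst); c_blue = 20, increment = 20,
-- int(increment / 10) = 2 (exact: 20/10 is an exact nonnegative division)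
def pvStepA (st : Int × Int × List (String × String)) (item : String) :
    Int × Int × List (String × String) :=
  let c_blue : Int := 20
  let increment : Int := 20
  let c_red := st.1 - increment / 10
  let c_green := st.2.1 + increment
  let base_value := pyHex c_red ++ pyHex c_green ++ pyHex c_blue
  (c_red, c_green, st.2.2 ++ [(item, "#" ++ base_value)])

def get_colour_list (lst : List String) : List (String × String) :=
  (lst.foldl pvStepA (210, 20, [])).2.2

-- ===== PORT B =====
-- colour(k) in Source B
def pvColour (k : Int) : String :=
  "#" ++ (pyHex (210 - 2 * k) ++ pyHex (20 + 20 * k) ++ pyHex 20)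

-- go(sub, off) in Source B; sub[:mid]/sub[mid:] with 0 ≤ mid ≤ len are exactly take/drop
def pvGo (sub : List String) (off : Int) : List (String × String) :=
  if sub = [] then []
  else if sub.length = 1 then [(sub.head!, pvColour (off + 1))]
  else
    let mid := sub.length / 2
    pvGo (sub.take mid) off ++ pvGo (sub.drop mid) (off + mid)
termination_by sub.length
decreasing_by
  · have : sub.length ≥ 2 := by
      rcases sub with _ | ⟨x, _ | _⟩ <;> simp_all
    simp; omega
  · have h1 : sub ≠ [] := by assumption
    have : 0 < sub.length := List.length_pos_iff.mpr h1
    simp; omega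

def get_colour_list_alt (lst : List String) : List (String × String) :=
  pvGo lst 0

-- ===== PRECONDITION & SPEC =====
def Spec_get_colour_list (lst : List String) (out : List (String × String)) : Prop := out = get_colour_list_alt lst
instance (lst : List String) (out : List (String × String)) : Decidable (Spec_get_colour_list lst out) := by unfold Spec_get_colour_list; infer_instance

-- ===== CLAIM (what is proved, stated in full; the proofs are below) =====
def Claim_equal_get_colour_list : Prop := ∀ (lst : List String), Dom_get_colour_list lst → Spec_get_colour_list lst (get_colour_list lst)

-- ===== LEMMAS AND PROOFS =====

-- closed form both ports are proved equal to
def pvColB (p : Int × String) : String × String := (p.2, pvColour (p.1 + 1))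

-- A's loop invariant: starting the fold at index s with state (210-2s, 20+20s)
-- produces the closed-form map over enumerate lst s
theorem pvLoopA_eq (lst : List String) (s : Int) (acc : List (String × String)) :
    (lst.foldl pvStepA (210 - 2 * s, 20 + 20 * s, acc)).2.2
      = acc ++ (PySem.List.enumerate lst s).map pvColB := by
  induction lst generalizing s acc with
  | nil => simp [PySem.List.enumerate_nil]
  | cons x xs ih =>
    have hstep : pvStepA (210 - 2 * s, 20 + 20 * s, acc) x
        = (210 - 2 * (s + 1), 20 + 20 * (s + 1), acc ++ [pvColB (s, x)]) := by
      have hr : (210 : Int) - 2 * s - 20 / 10 = 210 - 2 * (s + 1) := by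
        have h : (20 : Int) / 10 = 2 := by norm_num
        rw [h]; ring
      have hg : (20 : Int) + 20 * s + 20 = 20 + 20 * (s + 1) := by ring
      simp only [pvStepA, pvColB, pvColour]
      rw [hr, hg]
    simp only [List.foldl_cons, hstep, ih, PySem.List.enumerate_cons, List.map_cons]
    simp

-- B's divide-and-conquer computes the same closed-form map
theorem pvGo_eq (sub : List String) (off : Int) :
    pvGo sub off = (PySem.List.enumerate sub off).map pvColB := by
  induction sub, off using pvGo.induct with
  | case1 off => simp [pvGo, PySem.List.enumerate_nil]
  | case2 sub off hne hlen =>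
    rcases sub with _ | ⟨x, rest⟩
    · simp at hne
    · have : rest = [] := by
        simp at hlen; exact hlen
      subst this
      simp [pvGo, PySem.List.enumerate_cons, PySem.List.enumerate_nil, pvColB]
  | case3 sub off hne hlen mid ih1 ih2 =>
    rw [pvGo]
    simp only [if_neg hne, if_neg hlen]
    have hsplit : sub = sub.take (sub.length / 2) ++ sub.drop (sub.length / 2) := by
      simp
    conv_rhs => rw [hsplit]
    rw [PySem.List.enumerate_append, List.map_append]
    have hlen2 : (sub.take (sub.length / 2)).length = sub.length / 2 := by
      simp; omega
    rw [hlen2]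
    exact congrArg₂ (· ++ ·) ih1 ih2

-- ===== VERDICT (by name: the statement is the Claim_ definition above) =====
theorem get_colour_list_spec : Claim_equal_get_colour_list := by
  intro lst _
  show get_colour_list lst = get_colour_list_alt lst
  have hA := pvLoopA_eq lst 0 []
  have hB := pvGo_eq lst 0
  simp only [get_colour_list, get_colour_list_alt]
  simpa [hB] using hA
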